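-- pv_equiv track=rewrite | github.com/ElektroDuck/CDMO_MCCVRP | solvers.py | cp_extract_route
-- ===== SOURCE A (Python) =====
-- def cp_extract_route(row_arr, num_clients, prev=[]):
--     if prev == []:
--         prev = [num_clients,]
--     elif row_arr[prev[-1]] == num_clients:
--         prev.append(num_clients)
--         return prev
--     else:
--         prev.append(row_arr[prev[-1]])
--
--     return cp_extract_route(row_arr, num_clients, prev)
-- ===== SOURCE B (Python) =====
-- def cp_extract_route(row_arr, num_clients, prev=[]):
--     cur = num_clients if prev == [] else prev[-1]
--     tail = []
--     while row_arr[cur] != num_clients: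
--         cur = row_arr[cur]
--         tail.append(cur)
--     tail.append(num_clients)
--     if prev == []:
--         return [num_clients] + tail
--     prev.extend(tail)
--     return prev
-- ===== Notes on version B (the rewrite author's own statement) =====
-- stated objective: simpler
-- what changed: Replaced A's tail recursion that rebuilds its state each call (re-testing prev==[] and re-indexing prev[-1]) by a plain iterative chase of the successor chain with a cursor variable, collecting the tail of the route and attaching it to prev once at the end.
import Mathlib
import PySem

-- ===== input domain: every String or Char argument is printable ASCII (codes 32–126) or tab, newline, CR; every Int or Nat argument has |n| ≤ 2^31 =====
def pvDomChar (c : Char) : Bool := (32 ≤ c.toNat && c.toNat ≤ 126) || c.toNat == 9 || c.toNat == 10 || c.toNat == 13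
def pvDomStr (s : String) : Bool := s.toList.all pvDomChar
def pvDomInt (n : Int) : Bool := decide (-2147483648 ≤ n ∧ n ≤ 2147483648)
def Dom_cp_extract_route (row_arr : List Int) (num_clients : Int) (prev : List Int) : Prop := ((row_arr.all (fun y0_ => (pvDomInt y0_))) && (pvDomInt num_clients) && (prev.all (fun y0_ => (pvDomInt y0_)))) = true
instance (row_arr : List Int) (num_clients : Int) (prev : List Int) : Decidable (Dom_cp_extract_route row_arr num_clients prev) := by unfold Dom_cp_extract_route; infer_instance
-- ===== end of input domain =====

-- B replaces A's tail recursion by an iterative cursor chase of the successor chain (objective: simpler).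
-- A mutates a caller-supplied non-empty prev in place (append); B performs the same mutation (extend); the theorems are about the return value.

-- ===== PORT A =====
-- fuel only makes the recursion total; Pre_ guarantees it is never exhausted (sentinel []).
def cp_extract_route_go (row_arr : List Int) (num_clients : Int) (prev : List Int) : Nat → List Int
  | 0 => []
  | fuel+1 =>
    if prev = [] then
      cp_extract_route_go row_arr num_clients [num_clients] fuel
    else
      match PySem.List.pyGet? prev (-1) with
      | none => []
      | some last =>
        match PySem.List.pyGet? row_arr last with
        | none => []
        | some v =>
          if v = num_clients then prev ++ [num_clients]
          else cp_extract_route_go row_arr num_clients (prev ++ [v]) fuel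

def cp_extract_route (row_arr : List Int) (num_clients : Int) (prev : List Int) : List Int :=
  cp_extract_route_go row_arr num_clients prev (2 * row_arr.length + 2)

-- ===== PORT B =====
-- the while loop: chase the cursor, collecting the appended tail; fuel only makes it total (none = not terminated).
def cp_alt_tail (row_arr : List Int) (num_clients : Int) (cur : Int) : Nat → Option (List Int)
  | 0 => none
  | fuel+1 =>
    match PySem.List.pyGet? row_arr cur with
    | none => none
    | some v =>
      if v = num_clients then some [num_clients]
      else (cp_alt_tail row_arr num_clients v fuel).map (fun t => v :: t)

def cp_extract_route_alt (row_arr : List Int) (num_clients : Int) (prev : List Int) : List Int :=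
  match (if prev = [] then some num_clients else PySem.List.pyGet? prev (-1)) with
  | none => []
  | some cur =>
    match cp_alt_tail row_arr num_clients cur (2 * row_arr.length + 1) with
    | none => []
    | some tail => if prev = [] then num_clients :: tail else prev ++ tail

-- ===== PRECONDITION & SPEC =====
-- one step of the successor chain (none = IndexError)
def pvStep_cp_extract_route (row_arr : List Int) (o : Option Int) : Option Int :=
  o.bind (PySem.List.pyGet? row_arr)

-- Pre_: starting from num_clients (empty prev) or prev's last element, following the successor
-- chain reaches num_clients with every index in range; A raises or recurses forever otherwise.
def Pre_cp_extract_route (row_arr : List Int) (num_clients : Int) (prev : List Int) : Prop :=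
  ∃ k ≤ 2 * row_arr.length,
    (pvStep_cp_extract_route row_arr)^[k+1]
      (some (if prev = [] then num_clients else (prev.getLast?).getD 0)) = some num_clients

instance (row_arr : List Int) (num_clients : Int) (prev : List Int) : Decidable (Pre_cp_extract_route row_arr num_clients prev) := by unfold Pre_cp_extract_route; infer_instance

def pvWitness_cp_extract_route : List Int × Int × List Int := ([1, 2, 0], 2, [])

def Spec_cp_extract_route (row_arr : List Int) (num_clients : Int) (prev : List Int) (out : List Int) : Prop := out = cp_extract_route_alt row_arr num_clients prev
instance (row_arr : List Int) (num_clients : Int) (prev : List Int) (out : List Int) : Decidable (Spec_cp_extract_route row_arr num_clients prev out) := by unfold Spec_cp_extract_route; infer_instance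

-- ===== CLAIM (what is proved, stated in full; the proofs are below) =====
def Claim_equal_cp_extract_route : Prop := ∀ (row_arr : List Int) (num_clients : Int) (prev : List Int), Dom_cp_extract_route row_arr num_clients prev → Pre_cp_extract_route row_arr num_clients prev → Spec_cp_extract_route row_arr num_clients prev (cp_extract_route row_arr num_clients prev)

-- ===== LEMMAS AND PROOFS =====

theorem pvStep_iterate_none (row_arr : List Int) (m : Nat) :
    (pvStep_cp_extract_route row_arr)^[m] none = none := by
  induction m with
  | zero => rfl
  | succ m ih => rw [Function.iterate_succ_apply, pvStep_cp_extract_route]; simpa using ih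

-- A's recursion, once past a non-empty accumulator, is B's loop with the accumulator prepended
theorem goA_eq_tail (row_arr : List Int) (num_clients : Int) :
    ∀ (fuel : Nat) (acc : List Int) (cur : Int),
      PySem.List.pyGet? acc (-1) = some cur →
      cp_extract_route_go row_arr num_clients acc fuel
        = (cp_alt_tail row_arr num_clients cur fuel).elim [] (acc ++ ·) := by
  intro fuel
  induction fuel with
  | zero => intro acc cur _; rfl
  | succ fuel ih =>
    intro acc cur hlast
    have hne : acc ≠ [] := by
      intro h; subst h; simp [PySem.List.pyGet?_neg_one] at hlast
    rw [cp_extract_route_go, cp_alt_tail]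
    simp only [if_neg hne, hlast]
    cases hrow : PySem.List.pyGet? row_arr cur with
    | none => rfl
    | some v =>
      by_cases hv : v = num_clients
      · simp [hv]
      · simp only [if_neg hv]
        rw [ih (acc ++ [v]) v (PySem.List.pyGet?_neg_one_append_singleton acc v)]
        cases cp_alt_tail row_arr num_clients v fuel with
        | none => rfl
        | some t => simp

theorem tail_mono (row_arr : List Int) (num_clients : Int) :
    ∀ (fuel : Nat) (cur : Int) (t : List Int),
      cp_alt_tail row_arr num_clients cur fuel = some t →
      cp_alt_tail row_arr num_clients cur (fuel + 1) = some t := by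
  intro fuel
  induction fuel with
  | zero => intro cur t h; simp [cp_alt_tail] at h
  | succ fuel ih =>
    intro cur t h
    rw [cp_alt_tail] at h ⊢
    cases hrow : PySem.List.pyGet? row_arr cur with
    | none => rw [hrow] at h; simp at h
    | some v =>
      rw [hrow] at h
      by_cases hv : v = num_clients
      · simpa [hv] using h
      · simp only [if_neg hv] at h ⊢
        cases ht : cp_alt_tail row_arr num_clients v fuel with
        | none => rw [ht] at h; simp at h
        | some t' => rw [ht] at h; rw [ih v t' ht]; simpa using h

theorem tail_mono_le (row_arr : List Int) (num_clients : Int) (cur : Int) (t : List Int)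
    {f f' : Nat} (hle : f ≤ f') (h : cp_alt_tail row_arr num_clients cur f = some t) :
    cp_alt_tail row_arr num_clients cur f' = some t := by
  induction f', hle using Nat.le_induction with
  | base => exact h
  | succ f' _ ih => exact tail_mono row_arr num_clients f' cur t ih

-- a chain hit within k+1 steps makes B's loop return within fuel k+1
theorem tail_of_hit (row_arr : List Int) (num_clients : Int) :
    ∀ (k : Nat) (cur : Int),
      (pvStep_cp_extract_route row_arr)^[k+1] (some cur) = some num_clients →
      ∃ t, cp_alt_tail row_arr num_clients cur (k+1) = some t := by
  intro k
  induction k with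
  | zero =>
    intro cur h
    rw [Function.iterate_one] at h
    have hrow : PySem.List.pyGet? row_arr cur = some num_clients := h
    refine ⟨[num_clients], ?_⟩
    rw [cp_alt_tail, hrow]
    simp
  | succ k ih =>
    intro cur h
    rw [Function.iterate_succ_apply] at h
    cases hrow : PySem.List.pyGet? row_arr cur with
    | none =>
      rw [show pvStep_cp_extract_route row_arr (some cur) = none by
            simp [pvStep_cp_extract_route, hrow]] at h
      rw [pvStep_iterate_none] at h; exact absurd h (by simp)
    | some v =>
      rw [show pvStep_cp_extract_route row_arr (some cur) = some v by
            simp [pvStep_cp_extract_route, hrow]] at h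
      by_cases hv : v = num_clients
      · refine ⟨[num_clients], ?_⟩
        rw [cp_alt_tail, hrow]; simp [hv]
      · obtain ⟨t, ht⟩ := ih v h
        refine ⟨v :: t, ?_⟩
        rw [cp_alt_tail, hrow]
        simp [hv, tail_mono_le row_arr num_clients v t (Nat.le_refl _) ht]

-- ===== VERDICT (by name: the statement is the Claim_ definition above) =====
theorem cp_extract_route_spec : Claim_equal_cp_extract_route := by
  intro row_arr num_clients prev _hdom hpre
  obtain ⟨k, hk, hhit⟩ := hpre
  unfold Spec_cp_extract_route cp_extract_route cp_extract_route_alt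
  by_cases hp : prev = []
  · subst hp
    have hhit' : (pvStep_cp_extract_route row_arr)^[k+1] (some num_clients) = some num_clients := by
      simpa using hhit
    obtain ⟨t, ht⟩ := tail_of_hit row_arr num_clients k num_clients hhit'
    have htF : cp_alt_tail row_arr num_clients num_clients (2 * row_arr.length + 1) = some t :=
      tail_mono_le row_arr num_clients num_clients t (by omega) ht
    have h2 : (2 : Nat) * row_arr.length + 2 = (2 * row_arr.length + 1) + 1 := by omega
    rw [h2, cp_extract_route_go]
    rw [goA_eq_tail row_arr num_clients (2 * row_arr.length + 1) [num_clients] num_clients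
          (by simp [PySem.List.pyGet?_neg_one])]
    simp [htF]
  · obtain ⟨last, hlastq⟩ : ∃ l, prev.getLast? = some l := by
      cases h : prev.getLast? with
      | none => exact absurd (List.getLast?_eq_none_iff.mp h) hp
      | some l => exact ⟨l, rfl⟩
    have hpg : PySem.List.pyGet? prev (-1) = some last := by
      rw [PySem.List.pyGet?_neg_one, hlastq]
    have hhit' : (pvStep_cp_extract_route row_arr)^[k+1] (some last) = some num_clients := by
      simpa [hp, hlastq] using hhit
    obtain ⟨t, ht⟩ := tail_of_hit row_arr num_clients k last hhit'
    have htF1 : cp_alt_tail row_arr num_clients last (2 * row_arr.length + 1) = some t :=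
      tail_mono_le row_arr num_clients last t (by omega) ht
    have htF2 : cp_alt_tail row_arr num_clients last (2 * row_arr.length + 2) = some t :=
      tail_mono_le row_arr num_clients last t (by omega) ht
    rw [goA_eq_tail row_arr num_clients (2 * row_arr.length + 2) prev last hpg]
    simp [hp, hpg, htF1, htF2]
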